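-- pv_equiv track=rewrite | github.com/tommasocarraro/SemNeSyKTRecSys | data/paths.py | get_clauses
-- ===== SOURCE A (Python) =====
-- def get_clauses(
--     source: str, target: str, max_hops: int
-- ) -> list[list[tuple[str, str, str]]]:
--     clauses = []
--     for i in range(max_hops):
--         clauses_max_hops_i = []
--         for hop in range(i):
--             clause = ""
--             clauses.append(clause)
--     return clauses
-- ===== SOURCE B (Python) =====
-- def get_clauses(
--     source: str, target: str, max_hops: int
-- ) -> list[list[tuple[str, str, str]]]:
--     n = max_hops
--     count = n * (n - 1) // 2 if n > 1 else 0
--     return [""] * count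
-- ===== Notes on version B (the rewrite author's own statement) =====
-- stated objective: simpler
-- what changed: Replaces the nested loop that appends empty strings one by one with a closed-form count n*(n-1)//2 and a single list replication.
import Mathlib
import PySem

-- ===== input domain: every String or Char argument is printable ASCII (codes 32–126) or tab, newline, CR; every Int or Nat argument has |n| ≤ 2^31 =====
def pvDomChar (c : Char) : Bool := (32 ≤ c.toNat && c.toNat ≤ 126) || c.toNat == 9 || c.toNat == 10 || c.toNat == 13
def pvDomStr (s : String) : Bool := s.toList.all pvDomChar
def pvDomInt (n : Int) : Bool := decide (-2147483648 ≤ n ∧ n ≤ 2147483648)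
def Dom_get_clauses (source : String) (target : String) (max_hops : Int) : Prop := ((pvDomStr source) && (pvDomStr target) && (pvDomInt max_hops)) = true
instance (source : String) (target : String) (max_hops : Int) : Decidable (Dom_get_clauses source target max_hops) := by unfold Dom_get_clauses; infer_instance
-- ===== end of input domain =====

-- B replaces A's dead-code nested loop with a closed-form count n*(n-1)//2 of empty strings and one list replication (simpler).

-- ===== PORT A =====
def get_clauses (source : String) (target : String) (max_hops : Int) : List String :=
  (PySem.List.pyRange 0 max_hops 1).foldl
    (fun clauses i =>
      -- clauses_max_hops_i = [] is dead local state; the inner loop appends "" to clauses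
      (PySem.List.pyRange 0 i 1).foldl (fun cs _hop => cs ++ [""]) clauses)
    []

-- ===== PORT B =====
def get_clauses_alt (source : String) (target : String) (max_hops : Int) : List String :=
  let count : Int :=
    if max_hops > 1 then PySem.Int.floordiv (max_hops * (max_hops - 1)) 2 else 0
  List.replicate count.toNat ""

-- ===== PRECONDITION & SPEC =====
def Spec_get_clauses (source : String) (target : String) (max_hops : Int) (out : List String) : Prop := out = get_clauses_alt source target max_hops
instance (source : String) (target : String) (max_hops : Int) (out : List String) : Decidable (Spec_get_clauses source target max_hops out) := by unfold Spec_get_clauses; infer_instance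

-- ===== CLAIM (what is proved, stated in full; the proofs are below) =====
def Claim_equal_get_clauses : Prop := ∀ (source : String) (target : String) (max_hops : Int), Dom_get_clauses source target max_hops → Spec_get_clauses source target max_hops (get_clauses source target max_hops)

-- ===== LEMMAS AND PROOFS =====

theorem inner_foldl_replicate (l : List Int) (acc : List String) :
    l.foldl (fun cs (_hop : Int) => cs ++ [""]) acc = acc ++ List.replicate l.length "" := by
  induction l generalizing acc with
  | nil => simp
  | cons x xs ih =>
      simp [List.foldl_cons, ih, List.replicate_succ]

theorem tri_step (n : Nat) : n * (n - 1) / 2 + n = (n + 1) * n / 2 := by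
  have h1 : Even (n * (n - 1)) := by
    cases n with
    | zero => simp
    | succ m => simpa [Nat.mul_comm] using (Nat.even_mul_succ_self m)
  have h2 : Even ((n + 1) * n) := by
    simpa [Nat.mul_comm] using (Nat.even_mul_succ_self n)
  obtain ⟨a, ha⟩ := h1
  obtain ⟨b, hb⟩ := h2
  have hab : b = a + n := by
    have : n * (n - 1) + 2 * n = (n + 1) * n := by
      cases n with
      | zero => simp
      | succ m =>
          simp only [Nat.succ_sub_one]
          ring
    omega
  omega

theorem outer_foldl_replicate (n : Nat) :
    (PySem.List.pyRange 0 (n : Int) 1).foldl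
      (fun clauses i => (PySem.List.pyRange 0 i 1).foldl (fun cs (_hop : Int) => cs ++ [""]) clauses) []
    = List.replicate (n * (n - 1) / 2) "" := by
  induction n with
  | zero => simp [PySem.List.pyRange_one_eq_nil]
  | succ m ih =>
      have hsplit : PySem.List.pyRange 0 ((m : Int) + 1) 1
          = PySem.List.pyRange 0 (m : Int) 1 ++ [(m : Int)] :=
        PySem.List.pyRange_one_succ_right (by positivity)
      have hcast : ((m + 1 : Nat) : Int) = (m : Int) + 1 := by push_cast; ring
      rw [hcast, hsplit, List.foldl_append, ih, List.foldl_cons, List.foldl_nil,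
        inner_foldl_replicate, PySem.List.length_pyRange_one]
      rw [← List.replicate_add]
      congr 1
      have := tri_step m
      simp only [Nat.add_sub_cancel]
      omega

theorem get_clauses_eq_alt (source target : String) (max_hops : Int) :
    get_clauses source target max_hops = get_clauses_alt source target max_hops := by
  unfold get_clauses get_clauses_alt
  by_cases h : max_hops ≤ 0
  · rw [PySem.List.pyRange_one_eq_nil h]
    have : ¬ max_hops > 1 := by omega
    simp [this, List.foldl_nil]
  · push_neg at h
    obtain ⟨n, rfl⟩ : ∃ n : Nat, max_hops = (n : Int) := ⟨max_hops.toNat, by omega⟩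
    rw [outer_foldl_replicate n]
    by_cases h1 : (n : Int) > 1
    · have hn : 1 ≤ n := by omega
      have hfd : PySem.Int.floordiv ((n : Int) * ((n : Int) - 1)) 2
          = ((n * (n - 1) / 2 : Nat) : Int) := by
        have : (n : Int) * ((n : Int) - 1) = ((n * (n - 1) : Nat) : Int) := by
          push_cast [Nat.cast_sub hn]; ring
        rw [this]
        exact_mod_cast PySem.Int.floordiv_natCast (n * (n - 1)) 2
      simp only [if_pos h1, hfd, Int.toNat_natCast]
    · have hn : n ≤ 1 := by omega
      interval_cases n <;> simp

-- ===== VERDICT (by name: the statement is the Claim_ definition above) =====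
theorem get_clauses_spec : Claim_equal_get_clauses := by
  intro source target max_hops _
  exact get_clauses_eq_alt source target max_hops
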